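-- pv_equiv track=rewrite | github.com/pythonwork1/vpip | pysplit.py | tachchu
-- ===== SOURCE A (Python) =====
-- def tachchu(xau):
--     mang=''
--     for  i in xau:
--         if not(i>='0' and i<='9'):
--             mang+=i
--         else:
--             mang+=' '
--     mang=mang.split()
--     if (len(mang)>0):
--         return mang
--     else:
--         return False
-- ===== SOURCE B (Python) =====
-- def tachchu(xau):
--     # single-pass tokenizer: digits and whitespace are separators
--     words = []
--     buf = []
--     for c in xau:
--         if ('0' <= c <= '9') or c.isspace():
--             if buf:
--                 words.append(''.join(buf))
--                 buf = []
--         else: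
--             buf.append(c)
--     if buf:
--         words.append(''.join(buf))
--     return words if words else False
-- ===== Notes on version B (the rewrite author's own statement) =====
-- stated objective: alternative
-- what changed: B is a single-pass tokenizer with an explicit word buffer instead of A's two-pass rewrite (replace digits with spaces into a new string, then str.split()).
-- outside the precondition, e.g. on tachchu('123'): A returns False, B returns False; on tachchu(' '): A returns False, B returns False
import Mathlib
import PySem

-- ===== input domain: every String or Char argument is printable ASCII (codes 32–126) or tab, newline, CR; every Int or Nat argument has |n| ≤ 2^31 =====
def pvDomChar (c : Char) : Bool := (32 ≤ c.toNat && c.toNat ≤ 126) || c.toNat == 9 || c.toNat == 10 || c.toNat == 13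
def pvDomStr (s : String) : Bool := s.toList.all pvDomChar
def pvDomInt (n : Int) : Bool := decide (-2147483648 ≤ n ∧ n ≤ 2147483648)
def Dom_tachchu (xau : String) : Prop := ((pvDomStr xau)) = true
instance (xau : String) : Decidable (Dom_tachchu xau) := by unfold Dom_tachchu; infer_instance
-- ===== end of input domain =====

-- B replaces A's two-pass rewrite (digits → spaces, then str.split()) by a single-pass
-- tokenizer with an explicit word buffer; same cost, different decomposition.

-- ===== PORT A =====
-- A builds the string mang (digits replaced by spaces), splits it, and returns the word
-- list if nonempty (else Python's A returns False, which is outside Pre_; the port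
-- returns [] there).
def tachchu (xau : String) : List String :=
  let mang : List Char :=
    xau.toList.foldl (fun m i => if ¬('0' ≤ i && i ≤ '9') then m ++ [i] else m ++ [' ']) []
  let mang' : List String := (PySem.Chars.split₀ mang).map String.ofList
  if mang'.length > 0 then mang' else []

-- ===== PORT B =====
def tachchuSep (c : Char) : Bool := ('0' ≤ c && c ≤ '9') || PySem.Chars.isspace c

def tachchuGo : List Char → List Char → List String → List String
  | [], buf, words => if buf.isEmpty then words else words ++ [String.ofList buf]
  | c :: rest, buf, words =>
      if tachchuSep c then
        if buf.isEmpty then tachchuGo rest [] words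
        else tachchuGo rest [] (words ++ [String.ofList buf])
      else tachchuGo rest (buf ++ [c]) words

-- B returns words if nonempty (else Python's B returns False, outside Pre_; [] here).
def tachchu_alt (xau : String) : List String :=
  let words := tachchuGo xau.toList [] []
  if words.length > 0 then words else []

-- ===== PRECONDITION & SPEC =====
-- Pre_ excludes exactly the strings whose every character is a digit or whitespace: there
-- both Pythons return False, which is not a value of the declared type list[str].
def Pre_tachchu (xau : String) : Prop :=
  (xau.toList.any (fun c => !(('0' ≤ c && c ≤ '9') || PySem.Chars.isspace c))) = true
instance (xau : String) : Decidable (Pre_tachchu xau) := by unfold Pre_tachchu; infer_instance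

def pvWitness_tachchu : String := "ab12cd"

def Spec_tachchu (xau : String) (out : List String) : Prop := out = tachchu_alt xau
instance (xau : String) (out : List String) : Decidable (Spec_tachchu xau out) := by unfold Spec_tachchu; infer_instance

-- ===== CLAIM (what is proved, stated in full; the proofs are below) =====
def Claim_equal_tachchu : Prop := ∀ (xau : String), Dom_tachchu xau → Pre_tachchu xau → Spec_tachchu xau (tachchu xau)

-- ===== LEMMAS AND PROOFS =====

-- the character substitution A performs
def tachchuSubst (c : Char) : Char := if ¬('0' ≤ c && c ≤ '9') then c else ' '

lemma tachchu_foldl_eq_map (cs : List Char) (m : List Char) :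
    cs.foldl (fun m i => if ¬('0' ≤ i && i ≤ '9') then m ++ [i] else m ++ [' ']) m
      = m ++ cs.map tachchuSubst := by
  induction cs generalizing m with
  | nil => simp
  | cons c rest ih =>
      simp only [List.foldl_cons, List.map_cons]
      by_cases h : ('0' ≤ c && c ≤ '9') = true
      · rw [if_neg (by simp [h]), ih]
        simp [tachchuSubst, h]
      · rw [if_pos (by simp_all), ih]
        simp [tachchuSubst, h]

lemma tachchu_isspace_subst (c : Char) :
    PySem.Chars.isspace (tachchuSubst c) = tachchuSep c := by
  unfold tachchuSubst tachchuSep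
  by_cases h : ('0' ≤ c && c ≤ '9') = true
  · simp [h]; decide
  · simp [h]

lemma tachchuGo_words (cs : List Char) (buf : List Char) (w : List String) :
    tachchuGo cs buf w = w ++ tachchuGo cs buf [] := by
  induction cs generalizing buf w with
  | nil => simp [tachchuGo]; split <;> simp
  | cons c rest ih =>
      simp only [tachchuGo]
      split
      · split
        · exact ih _ _
        · rw [ih _ (w ++ _), ih _ ([] ++ _)]; simp
      · exact ih _ _

lemma tachchu_split_go_eq (cs : List Char) (cur : List Char) (acc : List (List Char)) :
    (PySem.Chars.split₀.go (cs.map tachchuSubst) cur acc).map String.ofList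
      = acc.reverse.map String.ofList ++ tachchuGo cs cur.reverse [] := by
  induction cs generalizing cur acc with
  | nil =>
      simp only [List.map_nil, PySem.Chars.split₀.go, tachchuGo]
      by_cases h : cur.isEmpty
      · simp_all
      · have : cur.reverse.isEmpty = false := by
          simp_all [List.isEmpty_iff]
        simp_all
  | cons c rest ih =>
      simp only [List.map_cons, PySem.Chars.split₀.go, tachchu_isspace_subst]
      by_cases hs : tachchuSep c
      · simp only [hs, if_pos, tachchuGo]
        by_cases h : cur.isEmpty
        · have h2 : cur.reverse.isEmpty = true := by simp_all [List.isEmpty_iff]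
          rw [if_pos h, if_pos h2, ih]
          simp
        · rw [if_neg h, if_neg (by simp_all [List.isEmpty_iff] : ¬ cur.reverse.isEmpty = true)]
          rw [ih, tachchuGo_words rest [] ([] ++ [String.ofList cur.reverse])]
          simp
      · have hc : tachchuSubst c = c := by
          unfold tachchuSep at hs
          unfold tachchuSubst
          by_cases hd : ('0' ≤ c && c ≤ '9') = true
          · simp [hd] at hs
          · simp [hd]
        simp only [hs, if_neg, Bool.false_eq_true, not_false_iff, hc, tachchuGo]
        rw [ih]
        simp

lemma tachchu_split_eq (cs : List Char) :
    (PySem.Chars.split₀ (cs.map tachchuSubst)).map String.ofList = tachchuGo cs [] [] := by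
  simpa [PySem.Chars.split₀] using tachchu_split_go_eq cs [] []

theorem tachchu_spec : Claim_equal_tachchu := by
  intro xau _ _
  unfold Spec_tachchu tachchu tachchu_alt
  simp only [tachchu_foldl_eq_map, List.nil_append, tachchu_split_eq]
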